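-- pv_equiv track=rewrite | github.com/marcoantonio1999/Computacion-Concurrente | Practica1/main.py | getMatriz
-- ===== SOURCE A (Python) =====
-- def getMatriz(k):
--     """
--     funcion que nos da la matriz indentidad de tamanio kxk
--
--     parametros
--     ----------
--
--     k: integer
--         la dimension de la matriz
--
--     returns
--     -------
--
--     matriz
--         la matriz identidad
--
--     """
--     matrizS = []
--     for i in range(k):
--         matrizS.append([])
--         for j in range(k):
--             matrizS[i].append([])
--
--
--     for i in range(k):
--         for j in range(k):
--             if i == j:
--                 matrizS[i][j] =  [1,1,1]
--                 continue
--             matrizS[i][j] = [0,0,0]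
--     return matrizS
-- ===== SOURCE B (Python) =====
-- def getMatriz(k):
--     # Flat-strip construction: one 1-D strip of n*n fresh [0,0,0] cells
--     # (n = the effective dimension, 0 for negative k), the diagonal hit by
--     # stride n+1, then the strip chopped into n rows.
--     n = max(k, 0)
--     flat = [[0, 0, 0] for _ in range(n * n)]
--     for i in range(n):
--         flat[i * (n + 1)] = [1, 1, 1]
--     return [flat[r * n:(r + 1) * n] for r in range(n)]
-- ===== Notes on version B (the rewrite author's own statement) =====
-- stated objective: alternative
-- what changed: Replaces A's nested 2-D sweeps (placeholder build pass plus branch-per-cell overwrite pass) by a 1-D flat strip of k*k cells whose diagonal is set by stride-(k+1) index arithmetic, then chopped into k rows by slicing.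
import Mathlib
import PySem

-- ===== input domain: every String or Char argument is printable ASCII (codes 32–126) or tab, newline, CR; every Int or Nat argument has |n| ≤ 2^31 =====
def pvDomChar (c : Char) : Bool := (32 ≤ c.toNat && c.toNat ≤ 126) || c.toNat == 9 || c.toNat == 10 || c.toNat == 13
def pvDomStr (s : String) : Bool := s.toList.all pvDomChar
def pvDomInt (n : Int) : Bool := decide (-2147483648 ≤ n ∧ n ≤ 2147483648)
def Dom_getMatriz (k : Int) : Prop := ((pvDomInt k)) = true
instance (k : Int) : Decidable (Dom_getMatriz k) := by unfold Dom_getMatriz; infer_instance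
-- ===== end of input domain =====

-- B builds one flat 1-D strip of k*k cells, sets the diagonal by stride-(k+1) index arithmetic
-- and chops the strip into rows by slicing, instead of A's two nested 2-D sweeps (objective:
-- alternative; return values proved identical for every k).

-- ===== PORT A =====
-- literal transliteration: phase 1 appends an empty row then appends k empty cells to it;
-- phase 2 overwrites every cell, [1,1,1] on the diagonal (the `continue` branch), [0,0,0] elsewhere.
def getMatriz (k : Int) : List (List (List Int)) :=
  let rng := PySem.List.pyRange 0 k 1
  let m1 : List (List (List Int)) :=
    rng.foldl (fun matrizS i =>
      let matrizS := matrizS ++ [([] : List (List Int))]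
      rng.foldl (fun m _j =>
        PySem.List.pySetD m i (PySem.List.pyGetD m i [] ++ [([] : List Int)])) matrizS) []
  rng.foldl (fun m i =>
    rng.foldl (fun m j =>
      if i = j then
        PySem.List.pySetD m i (PySem.List.pySetD (PySem.List.pyGetD m i []) j [1, 1, 1])
      else
        PySem.List.pySetD m i (PySem.List.pySetD (PySem.List.pyGetD m i []) j [0, 0, 0])) m) m1

-- ===== PORT B =====
-- literal transliteration of Source B: effective dimension n = max(k,0), flat strip of n*n cells,
-- diagonal at stride n+1, slice into rows.
def getMatriz_alt (k : Int) : List (List (List Int)) :=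
  let n := max k 0
  let flat0 : List (List Int) :=
    (PySem.List.pyRange 0 (n * n) 1).map (fun _ => ([0, 0, 0] : List Int))
  let flat := (PySem.List.pyRange 0 n 1).foldl
    (fun f i => PySem.List.pySetD f (i * (n + 1)) [1, 1, 1]) flat0
  (PySem.List.pyRange 0 n 1).map (fun r =>
    PySem.List.slice flat (some (r * n)) (some ((r + 1) * n)))

-- ===== PRECONDITION & SPEC =====
def Spec_getMatriz (k : Int) (out : List (List (List Int))) : Prop := out = getMatriz_alt k
instance (k : Int) (out : List (List (List Int))) : Decidable (Spec_getMatriz k out) := by unfold Spec_getMatriz; infer_instance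

-- ===== CLAIM (what is proved, stated in full; the proofs are below) =====
def Claim_equal_getMatriz : Prop := ∀ (k : Int), Dom_getMatriz k → Spec_getMatriz k (getMatriz k)

-- ===== LEMMAS AND PROOFS =====

-- the common value of both ports: the n×n identity-of-triples matrix
def pvIdent (n : Nat) : List (List (List Int)) :=
  (List.range n).map (fun i => (List.range n).map (fun j => if i = j then [1, 1, 1] else [0, 0, 0]))

theorem pv_rng (k : Int) :
    PySem.List.pyRange 0 k 1 = (List.range k.toNat).map (fun (j : Nat) => (j : Int)) := by
  rw [PySem.List.pyRange_one]
  simp only [Int.sub_zero, zero_add]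

theorem pv_foldl_set_range {α : Type} (d : α) (f : Nat → α → α) (xs : List α) (m : Nat)
    (h : m ≤ xs.length) :
    (List.range m).foldl (fun acc j => acc.set j (f j (acc.getD j d))) xs
      = (List.range m).map (fun j => f j (xs.getD j d)) ++ xs.drop m := by
  induction m with
  | zero => simp
  | succ m ih =>
    have hm : m < xs.length := h
    rw [List.range_succ, List.foldl_append, List.map_append, ih (Nat.le_of_lt hm)]
    have hlenmap : ((List.range m).map (fun j => f j (xs.getD j d))).length = m := by simp
    have hdrop : xs.drop m = xs[m] :: xs.drop (m + 1) := List.drop_eq_getElem_cons hm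
    simp only [List.foldl_cons, List.foldl_nil]
    have hgetD : ((List.range m).map (fun j => f j (xs.getD j d)) ++ xs.drop m).getD m d
        = xs.getD m d := by
      rw [List.getD, List.getElem?_append_right hlenmap.le, hlenmap, Nat.sub_self,
        hdrop]
      simp [List.getD, List.getElem?_eq_getElem hm]
    rw [hgetD, List.set_append, hlenmap, if_neg (lt_irrefl m), Nat.sub_self, hdrop,
      List.set_cons_zero]
    simp

theorem pv_foldl_set_one {α β : Type} (d : α) (g : β → α → α) (l : List β)
    (m : List α) (i : Nat) (hi : i < m.length) :
    l.foldl (fun acc b => acc.set i (g b (acc.getD i d))) m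
      = m.set i (l.foldl (fun r b => g b r) (m.getD i d)) := by
  induction l generalizing m with
  | nil => simp [List.getD, List.getElem?_eq_getElem hi, List.set_getElem_self]
  | cons b l ih =>
    simp only [List.foldl_cons]
    rw [ih _ (by simpa using hi)]
    have hg : (m.set i (g b (m.getD i d))).getD i d = g b (m.getD i d) := by
      rw [List.getD, List.getElem?_set_self hi]; rfl
    rw [hg, List.set_set]

theorem pv_foldl_congr_inv {α β : Type} (P : α → Prop) (f g : α → β → α) :
    ∀ (l : List β) (a : α), P a → (∀ x b, P x → b ∈ l → f x b = g x b) →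
      (∀ x b, P x → P (g x b)) → l.foldl f a = l.foldl g a := by
  intro l
  induction l with
  | nil => intro a _ _ _; rfl
  | cons b l ih =>
    intro a h0 hfg hpres
    simp only [List.foldl_cons]
    rw [hfg a b h0 (List.mem_cons_self ..)]
    exact ih (g a b) (hpres a b h0) (fun x c hx hc => hfg x c hx (List.mem_cons_of_mem _ hc))
      hpres

theorem pv_phase1 (n m : Nat) (hm : m ≤ n) :
    (List.range m).foldl (fun matrizS i =>
        (List.range n).foldl (fun a _ => a.set i (a.getD i [] ++ [([] : List Int)]))
          (matrizS ++ [([] : List (List Int))])) []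
      = List.replicate m (List.replicate n ([] : List Int)) := by
  induction m with
  | zero => simp
  | succ m ih =>
    rw [List.range_succ, List.foldl_append, ih (Nat.le_of_lt hm)]
    simp only [List.foldl_cons, List.foldl_nil]
    set R := List.replicate m (List.replicate n ([] : List Int)) with hR
    have hlen : R.length = m := by simp [hR]
    have hi : m < (R ++ [([] : List (List Int))]).length := by simp [hlen]
    have happ : ∀ (mm : Nat) (acc : List (List (List Int))) (h : m < acc.length),
        (List.range mm).foldl (fun a _ => a.set m (a.getD m [] ++ [([] : List Int)])) acc
          = acc.set m (acc.getD m [] ++ List.replicate mm ([] : List Int)) := by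
      intro mm
      induction mm with
      | zero =>
        intro acc h
        simp [List.getD, List.getElem?_eq_getElem h, List.set_getElem_self]
      | succ mm ih2 =>
        intro acc h
        rw [List.range_succ, List.foldl_append, ih2 acc h]
        simp only [List.foldl_cons, List.foldl_nil]
        have hg : (acc.set m (acc.getD m [] ++ List.replicate mm ([] : List Int))).getD m []
            = acc.getD m [] ++ List.replicate mm ([] : List Int) := by
          rw [List.getD, List.getElem?_set_self h]; rfl
        rw [hg, List.set_set, List.append_assoc, ← List.replicate_succ']
    rw [happ n _ hi]
    have hgd : (R ++ [([] : List (List Int))]).getD m [] = [] := by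
      rw [List.getD, List.getElem?_append_right hlen.le, hlen, Nat.sub_self]; rfl
    rw [hgd, List.nil_append, List.set_append, hlen, if_neg (lt_irrefl m), Nat.sub_self,
      List.set_cons_zero, List.replicate_succ', hR]

theorem pv_A_eq (k : Int) : getMatriz k = pvIdent k.toNat := by
  unfold getMatriz
  rw [pv_rng]
  set n := k.toNat with hn
  simp only [List.foldl_map, PySem.List.pySetD_natCast, PySem.List.pyGetD_natCast]
  rw [pv_phase1 n n le_rfl]
  set m1 := List.replicate n (List.replicate n ([] : List Int)) with hm1
  have hm1len : m1.length = n := by simp [hm1]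
  have houter : ∀ (m : List (List (List Int))) (i : Nat), i < m.length →
      (List.range n).foldl (fun m (j : Nat) =>
          if (i : Int) = (j : Int) then m.set i ((m.getD i []).set j [1, 1, 1])
          else m.set i ((m.getD i []).set j [0, 0, 0])) m
        = m.set i ((List.range n).foldl
            (fun r j => r.set j (if i = j then [1, 1, 1] else [0, 0, 0])) (m.getD i [])) := by
    intro m i him
    have hstep : ∀ (m : List (List (List Int))) (j : Nat),
        (if (i : Int) = (j : Int) then m.set i ((m.getD i []).set j [1, 1, 1])
          else m.set i ((m.getD i []).set j [0, 0, 0]))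
        = m.set i ((fun (j : Nat) (r : List (List Int)) =>
            r.set j (if i = j then [1, 1, 1] else [0, 0, 0])) j (m.getD i [])) := by
      intro m j
      by_cases h : i = j <;> simp [h]
    have hf : (fun (m : List (List (List Int))) (j : Nat) =>
        if (i : Int) = (j : Int) then m.set i ((m.getD i []).set j [1, 1, 1])
        else m.set i ((m.getD i []).set j [0, 0, 0]) : List (List (List Int)) → Nat → List (List (List Int)))
      = fun m j => m.set i ((fun (j : Nat) (r : List (List Int)) =>
          r.set j (if i = j then [1, 1, 1] else [0, 0, 0])) j (m.getD i [])) := by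
      funext m' j; exact hstep m' j
    rw [hf]
    exact pv_foldl_set_one [] (fun (j : Nat) (r : List (List Int)) =>
      r.set j (if i = j then [1, 1, 1] else [0, 0, 0])) (List.range n) m i him
  have hcong : (List.range n).foldl (fun m (i : Nat) =>
        (List.range n).foldl (fun m (j : Nat) =>
          if (i : Int) = (j : Int) then m.set i ((m.getD i []).set j [1, 1, 1])
          else m.set i ((m.getD i []).set j [0, 0, 0])) m) m1
      = (List.range n).foldl (fun m i => m.set i ((fun (i : Nat) (r : List (List Int)) =>
          (List.range n).foldl (fun r j => r.set j (if i = j then [1, 1, 1] else [0, 0, 0])) r) i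
          (m.getD i []))) m1 := by
    apply pv_foldl_congr_inv (fun m => m.length = n) _ _ (List.range n) m1 hm1len
    · intro m i hlen hmem
      exact houter m i (by rw [hlen]; exact List.mem_range.mp hmem)
    · intro m i hlen; simpa using hlen
  rw [hcong, pv_foldl_set_range ([] : List (List Int)) (fun (i : Nat) (r : List (List Int)) =>
    (List.range n).foldl (fun r j => r.set j (if i = j then [1, 1, 1] else [0, 0, 0])) r)
    m1 n hm1len.ge]
  have hrow : ∀ i, i < n → (List.range n).foldl
      (fun r j => r.set j (if i = j then [1, 1, 1] else [0, 0, 0])) (m1.getD i [])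
      = (List.range n).map (fun j => if i = j then ([1, 1, 1] : List Int) else [0, 0, 0]) := by
    intro i hi
    have hlen : (m1.getD i []).length = n := by
      rw [hm1, List.getD, List.getElem?_eq_getElem (by simpa using hi)]
      simp
    rw [pv_foldl_set_range ([] : List Int) (fun j _ => if i = j then [1, 1, 1] else [0, 0, 0])
      _ n hlen.ge, List.drop_eq_nil_of_le hlen.le, List.append_nil]
  rw [List.drop_eq_nil_of_le hm1len.le]
  unfold pvIdent
  rw [List.append_nil]
  apply List.map_congr_left
  intro i hi
  exact hrow i (List.mem_range.mp hi)

theorem pv_setfold_length {a : Type} (v : a) (p : Nat → Nat) (l : List Nat) (xs : List a) :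
    (l.foldl (fun f i => f.set (p i) v) xs).length = xs.length := by
  induction l generalizing xs with
  | nil => rfl
  | cons b l ih => simp [List.foldl_cons, ih]

theorem pv_setfold_getElem? {a : Type} (v : a) (p : Nat → Nat) (l : List Nat) (xs : List a)
    (t : Nat) :
    (l.foldl (fun f i => f.set (p i) v) xs)[t]?
      = if ∃ i ∈ l, p i = t then (if t < xs.length then some v else none) else xs[t]? := by
  induction l generalizing xs with
  | nil => simp
  | cons b l ih =>
    simp only [List.foldl_cons]
    rw [ih]
    by_cases hl : ∃ i ∈ l, p i = t
    · have hmem : ∃ i ∈ b :: l, p i = t :=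
        ⟨hl.choose, List.mem_cons_of_mem _ hl.choose_spec.1, hl.choose_spec.2⟩
      rw [if_pos hl, if_pos hmem]
      simp
    · rw [if_neg hl]
      by_cases hb : p b = t
      · rw [if_pos ⟨b, List.mem_cons_self .., hb⟩, ← hb, List.getElem?_set_self']
        by_cases ht : p b < xs.length
        · rw [if_pos ht, List.getElem?_eq_getElem ht]; rfl
        · rw [if_neg ht, List.getElem?_eq_none (by omega)]; rfl
      · have : ¬ ∃ i ∈ b :: l, p i = t := by
          rintro ⟨i, hi, he⟩
          rcases List.mem_cons.mp hi with rfl | hi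
          · exact hb he
          · exact hl ⟨i, hi, he⟩
        rw [if_neg this, List.getElem?_set_ne hb]

theorem pv_diag_iff (n r j : Nat) (hr : r < n) (hj : j < n) :
    (∃ i ∈ List.range n, i * (n + 1) = r * n + j) ↔ r = j := by
  constructor
  · rintro ⟨i, hi, he⟩
    have hi' : i < n := List.mem_range.mp hi
    rcases Nat.lt_trichotomy i r with h | h | h
    · exfalso
      have h1 : (i + 1) * n ≤ r * n := Nat.mul_le_mul_right n h
      nlinarith
    · subst h
      have : i * n + i = i * n + j := by rw [← he]; ring
      omega
    · exfalso
      have h1 : (r + 1) * n ≤ i * n := Nat.mul_le_mul_right n h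
      nlinarith
  · rintro rfl
    exact ⟨r, List.mem_range.mpr hr, by ring⟩

theorem pv_B_eq (k : Int) : getMatriz_alt k = pvIdent k.toNat := by
  unfold getMatriz_alt
  by_cases hk : 0 ≤ k
  · -- k ≥ 0: the effective dimension is k itself
    rw [max_eq_left hk]
    dsimp only
    obtain ⟨n, rfl⟩ : ∃ n : Nat, k = (n : Int) := ⟨k.toNat, (Int.toNat_of_nonneg hk).symm⟩
    have hkk : ((n : Int) * n).toNat = n * n := by
      rw [← Nat.cast_mul, Int.toNat_natCast]
    rw [pv_rng, pv_rng, hkk, Int.toNat_natCast]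
    simp only [List.foldl_map, List.map_map, Function.comp_def]
    have hset : ∀ (f : List (List Int)) (i : Nat),
        PySem.List.pySetD f ((i : Int) * ((n : Int) + 1)) [1, 1, 1]
          = f.set (i * (n + 1)) [1, 1, 1] := by
      intro f i
      have : ((i : Int) * ((n : Int) + 1)) = ((i * (n + 1) : Nat) : Int) := by push_cast; ring
      rw [this, PySem.List.pySetD_natCast]
    simp only [hset]
    set xs0 : List (List Int) := (List.range (n * n)).map (fun _ => ([0, 0, 0] : List Int))
      with hxs0
    have hxs0len : xs0.length = n * n := by simp [hxs0]
    set flat := (List.range n).foldl (fun f i => f.set (i * (n + 1)) [1, 1, 1]) xs0 with hflat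
    have hflen : flat.length = n * n := by rw [hflat, pv_setfold_length, hxs0len]
    unfold pvIdent
    apply List.map_congr_left
    intro r hr
    have hr' : r < n := List.mem_range.mp hr
    have hsl : PySem.List.slice flat (some ((r : Int) * n)) (some (((r : Int) + 1) * n))
        = (flat.drop (r * n)).take n := by
      have h1 : ((r : Int) * n) = ((r * n : Nat) : Int) := by push_cast; ring
      have h2 : (((r : Int) + 1) * n) = ((r * n : Nat) : Int) + ((n : Nat) : Int) := by
        push_cast; ring
      rw [h1, h2, PySem.List.slice_natCast_add]
    rw [hsl]
    have hle : r * n + n ≤ n * n := by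
      have := Nat.mul_le_mul_right n hr'
      nlinarith
    apply List.ext_getElem
    · simp [hflen]; omega
    · intro j hj1 hj2
      have hj : j < n := by simpa using hj2
      have hlt : r * n + j < n * n := by omega
      have hget : flat[r * n + j]? = some (if r = j then [1, 1, 1] else [0, 0, 0]) := by
        rw [hflat, pv_setfold_getElem?, hxs0len]
        by_cases h : r = j
        · rw [if_pos ((pv_diag_iff n r j hr' hj).mpr h), if_pos hlt, if_pos h]
        · rw [if_neg (fun he => h ((pv_diag_iff n r j hr' hj).mp he)), hxs0,
            List.getElem?_map, List.getElem?_range hlt, if_neg h]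
          rfl
      rw [List.getElem_take, List.getElem_drop, List.getElem_map, List.getElem_range]
      have : flat[r * n + j] = if r = j then [1, 1, 1] else [0, 0, 0] := by
        have := List.getElem?_eq_getElem (l := flat) (i := r * n + j) (by omega)
        rw [hget] at this
        exact (Option.some.inj this).symm
      rw [this]
  · -- k < 0: the effective dimension is 0, all ranges are empty and pvIdent 0 = []
    rw [max_eq_right (by omega)]
    dsimp only
    have h1 : PySem.List.pyRange 0 0 1 = [] := by rw [pv_rng]; simp
    have h2 : k.toNat = 0 := by omega
    rw [h1, h2]
    simp [pvIdent]

-- ===== VERDICT (by name: the statement is the Claim_ definition above) =====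
theorem getMatriz_spec : Claim_equal_getMatriz := by
  intro k _
  unfold Spec_getMatriz
  rw [pv_A_eq, pv_B_eq]
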